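-- pv_equiv track=rewrite | github.com/CharlesBryanJr/coding_interview_questions | best_seat.py | find_best_seat
-- ===== SOURCE A (Python) =====
-- def find_best_seat(i, start, end, most_space, best_seat, seats):
--     in_range = i < len(seats)
--     if not in_range:
--         return best_seat
--
--     available_seat = (seats[i] == 0)
--     if available_seat:
--         return find_best_seat(i + 1, start, i, most_space, best_seat, seats)
--
--     if end - start > most_space:
--         best_seat = (end + start) // 2
--         most_space = end - start
--
--     return find_best_seat(i + 1, i + 1, i + 1, most_space, best_seat, seats)
-- ===== SOURCE B (Python) =====
-- def find_best_seat(i, start, end, most_space, best_seat, seats):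
--     # one forward pass with local state instead of tail recursion
--     for j in range(i, len(seats)):
--         if seats[j] == 0:
--             end = j
--         else:
--             if end - start > most_space:
--                 best_seat = (end + start) // 2
--                 most_space = end - start
--             start = end = j + 1
--     return best_seat
-- ===== Notes on version B (the rewrite author's own statement) =====
-- stated objective: simpler
-- what changed: Replaced the five-argument tail recursion by a single for-loop over range(i, len(seats)) that updates local state; avoids Python recursion depth on long rows.
import Mathlib
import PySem

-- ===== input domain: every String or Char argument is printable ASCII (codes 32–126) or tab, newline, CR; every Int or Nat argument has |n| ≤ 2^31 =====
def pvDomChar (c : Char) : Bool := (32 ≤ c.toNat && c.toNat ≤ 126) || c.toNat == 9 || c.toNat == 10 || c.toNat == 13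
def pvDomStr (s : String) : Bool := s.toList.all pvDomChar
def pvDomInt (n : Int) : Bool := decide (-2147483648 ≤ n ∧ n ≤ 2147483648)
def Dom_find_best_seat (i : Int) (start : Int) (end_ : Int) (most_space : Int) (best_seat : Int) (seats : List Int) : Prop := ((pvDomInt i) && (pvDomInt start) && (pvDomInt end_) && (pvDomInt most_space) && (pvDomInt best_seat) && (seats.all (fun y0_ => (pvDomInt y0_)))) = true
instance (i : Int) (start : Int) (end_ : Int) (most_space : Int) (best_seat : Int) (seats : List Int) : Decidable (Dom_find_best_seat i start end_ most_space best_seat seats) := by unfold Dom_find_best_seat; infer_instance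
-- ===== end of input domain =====

-- B replaces A's five-argument tail recursion by one for-loop (a fold over range(i, len(seats))) carrying the same state; return value only, no mutation.

-- ===== PORT A =====
def find_best_seat (i : Int) (start : Int) (end_ : Int) (most_space : Int) (best_seat : Int) (seats : List Int) : Int :=
  if h : i < (seats.length : Int) then
    match PySem.List.pyGet? seats i with
    | none => 0  -- IndexError in Python (i < -len); excluded by Pre_
    | some v =>
      if v = 0 then
        find_best_seat (i + 1) start i most_space best_seat seats
      else if end_ - start > most_space then
        find_best_seat (i + 1) (i + 1) (i + 1) (end_ - start) (PySem.Int.floordiv (end_ + start) 2) seats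
      else
        find_best_seat (i + 1) (i + 1) (i + 1) most_space best_seat seats
  else
    best_seat
termination_by ((seats.length : Int) - i).toNat
decreasing_by all_goals omega

-- ===== PORT B =====
-- loop body of B's for-loop: state is (start, end, most_space, best_seat)
def pvStepB (seats : List Int) (s : Int × Int × Int × Int) (j : Int) : Int × Int × Int × Int :=
  match PySem.List.pyGet? seats j with
  | none => s  -- IndexError in Python; excluded by Pre_
  | some v =>
    if v = 0 then (s.1, j, s.2.2.1, s.2.2.2)
    else if s.2.1 - s.1 > s.2.2.1 then
      (j + 1, j + 1, s.2.1 - s.1, PySem.Int.floordiv (s.2.1 + s.1) 2)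
    else
      (j + 1, j + 1, s.2.2.1, s.2.2.2)

def find_best_seat_alt (i : Int) (start : Int) (end_ : Int) (most_space : Int) (best_seat : Int) (seats : List Int) : Int :=
  ((PySem.List.pyRange i (seats.length : Int) 1).foldl (pvStepB seats) (start, end_, most_space, best_seat)).2.2.2

-- ===== PRECONDITION & SPEC =====
-- Pre_ excludes exactly the inputs where Python raises IndexError: i < -len(seats) (both A and B access seats[i] there).
def Pre_find_best_seat (i : Int) (start : Int) (end_ : Int) (most_space : Int) (best_seat : Int) (seats : List Int) : Prop :=
  -((seats.length : Int)) ≤ i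
instance (i : Int) (start : Int) (end_ : Int) (most_space : Int) (best_seat : Int) (seats : List Int) : Decidable (Pre_find_best_seat i start end_ most_space best_seat seats) := by unfold Pre_find_best_seat; infer_instance

def pvWitness_find_best_seat : Int × Int × Int × Int × Int × List Int := (0, 0, 0, 0, 0, [1, 0, 0, 1, 0, 1])

def Spec_find_best_seat (i : Int) (start : Int) (end_ : Int) (most_space : Int) (best_seat : Int) (seats : List Int) (out : Int) : Prop := out = find_best_seat_alt i start end_ most_space best_seat seats
instance (i : Int) (start : Int) (end_ : Int) (most_space : Int) (best_seat : Int) (seats : List Int) (out : Int) : Decidable (Spec_find_best_seat i start end_ most_space best_seat seats out) := by unfold Spec_find_best_seat; infer_instance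

-- ===== CLAIM (what is proved, stated in full; the proofs are below) =====
def Claim_equal_find_best_seat : Prop := ∀ (i : Int) (start : Int) (end_ : Int) (most_space : Int) (best_seat : Int) (seats : List Int), Dom_find_best_seat i start end_ most_space best_seat seats → Pre_find_best_seat i start end_ most_space best_seat seats → Spec_find_best_seat i start end_ most_space best_seat seats (find_best_seat i start end_ most_space best_seat seats)

-- ===== LEMMAS AND PROOFS =====

lemma find_best_seat_eq_fold (seats : List Int) :
    ∀ (k : Nat) (i start end_ most_space best_seat : Int),
      (((seats.length : Int) - i).toNat = k) → -((seats.length : Int)) ≤ i →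
      find_best_seat i start end_ most_space best_seat seats =
        ((PySem.List.pyRange i (seats.length : Int) 1).foldl (pvStepB seats)
          (start, end_, most_space, best_seat)).2.2.2 := by
  intro k
  induction k with
  | zero =>
    intro i start end_ most_space best_seat hk _
    have hge : (seats.length : Int) ≤ i := by omega
    rw [PySem.List.pyRange_one_eq_nil hge]
    rw [find_best_seat]
    rw [dif_neg (by omega)]
    rfl
  | succ n ih =>
    intro i start end_ most_space best_seat hk hge
    have hlt : i < (seats.length : Int) := by omega
    obtain ⟨v, hv⟩ : ∃ v, PySem.List.pyGet? seats i = some v := by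
      cases h : PySem.List.pyGet? seats i with
      | none =>
        exfalso
        have := (PySem.List.pyGet?_eq_none_iff (xs := seats) (i := i)).mp h
        exact this (by constructor <;> omega)
      | some v => exact ⟨v, rfl⟩
    rw [PySem.List.pyRange_one_cons hlt, List.foldl_cons]
    rw [find_best_seat, dif_pos hlt, hv]
    simp only [pvStepB, hv]
    by_cases hz : v = 0
    · rw [if_pos hz, if_pos hz]
      exact ih (i + 1) start i most_space best_seat (by omega) (by omega)
    · rw [if_neg hz, if_neg hz]
      by_cases hm : end_ - start > most_space
      · rw [if_pos hm, if_pos hm]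
        exact ih (i + 1) (i + 1) (i + 1) (end_ - start)
          (PySem.Int.floordiv (end_ + start) 2) (by omega) (by omega)
      · rw [if_neg hm, if_neg hm]
        exact ih (i + 1) (i + 1) (i + 1) most_space best_seat (by omega) (by omega)

-- ===== VERDICT (by name: the statement is the Claim_ definition above) =====
theorem find_best_seat_spec : Claim_equal_find_best_seat := by
  intro i start end_ most_space best_seat seats _ hpre
  unfold Spec_find_best_seat find_best_seat_alt
  exact find_best_seat_eq_fold seats _ i start end_ most_space best_seat rfl hpre
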